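-- pv_equiv track=rewrite | github.com/cnkang/nginx-markdown-for-agents | tools/release/tests/test_scope_evaluation_pbt.py | _split_compound_non_goal
-- ===== SOURCE A (Python) =====
-- def _split_compound_non_goal(non_goal: str) -> list[str]:
--     """Split a compound non-goal into individual components.
--
--     Splits on ", " and " or " delimiters, trims each part,
--     and returns only components that are at least 3 characters long.
--     """
--     # Two-pass split avoids overlapping \s+ quantifiers (S5852).
--     # First split on comma, then split each fragment on " or ".
--     parts = []
--     for fragment in non_goal.split(","):
--         for component in fragment.split(" or "):
--             stripped = component.strip()
--             if len(stripped) >= 3: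
--                 parts.append(stripped)
--     return parts
-- ===== SOURCE B (Python) =====
-- def _split_compound_non_goal(non_goal: str) -> list[str]:
--     """Split a compound non-goal into individual components.
--
--     Single-pass scanner: walk the string once with a cursor, buffering the
--     current token and flushing it whenever a ',' or a " or " delimiter
--     starts at the cursor; flushed tokens are stripped and kept if >= 3 chars.
--     """
--     parts: list[str] = []
--     buf: list[str] = []
--
--     def flush() -> None:
--         token = "".join(buf).strip()
--         if len(token) >= 3:
--             parts.append(token)
--         buf.clear()
--
--     i, n = 0, len(non_goal)
--     while i < n:
--         if non_goal[i] == ",":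
--             flush()
--             i += 1
--         elif non_goal.startswith(" or ", i):
--             flush()
--             i += 4
--         else:
--             buf.append(non_goal[i])
--             i += 1
--     flush()
--     return parts
-- ===== Notes on version B (the rewrite author's own statement) =====
-- stated objective: alternative
-- what changed: B replaces A's two-level split-then-split pipeline by a single-pass character scanner: one cursor walks the string, buffering the current token and flushing it (strip, keep if at least 3 chars) whenever a comma or the four-character or-delimiter starts at the cursor, so no intermediate fragment lists are ever built.
import Mathlib
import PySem

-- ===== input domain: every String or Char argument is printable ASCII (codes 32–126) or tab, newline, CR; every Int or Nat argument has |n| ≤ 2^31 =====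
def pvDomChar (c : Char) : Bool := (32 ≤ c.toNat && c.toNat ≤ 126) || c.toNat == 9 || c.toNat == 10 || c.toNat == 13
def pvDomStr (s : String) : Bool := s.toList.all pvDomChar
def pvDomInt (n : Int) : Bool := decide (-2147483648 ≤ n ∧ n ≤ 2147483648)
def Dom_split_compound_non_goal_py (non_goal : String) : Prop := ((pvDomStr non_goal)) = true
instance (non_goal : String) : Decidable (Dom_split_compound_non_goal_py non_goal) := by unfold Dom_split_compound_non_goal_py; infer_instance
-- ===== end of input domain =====

-- B replaces A's two nested split loops by a single-pass character scanner with a token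
-- buffer flushed at each delimiter occurrence (alternative decomposition, same cost).

-- ===== PORT A =====
-- literal port of A: split on ",", split each fragment on " or ", strip, keep length ≥ 3
def split_compound_non_goal_py (non_goal : String) : List String :=
  (PySem.Chars.splitOn non_goal.toList [',']).foldl
    (fun parts fragment =>
      (PySem.Chars.splitOn fragment [' ', 'o', 'r', ' ']).foldl
        (fun parts component =>
          if (3 ≤ (PySem.Chars.strip component).length : Bool) then
            parts ++ [String.ofList (PySem.Chars.strip component)]
          else parts)
        parts)
    []

-- ===== PORT B =====
-- port of B's flush(): strip the buffer, append the token if its length is ≥ 3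
def pvFlushB (buf : List Char) (parts : List String) : List String :=
  if (3 ≤ (PySem.Chars.strip buf).length : Bool) then
    parts ++ [String.ofList (PySem.Chars.strip buf)]
  else parts

-- port of B's while loop: one cursor over the characters, flushing on ',' or " or "
def pvScanB : List Char → List Char → List String → List String
  | [], buf, parts => pvFlushB buf parts
  | c :: t, buf, parts =>
    if c = ',' then pvScanB t [] (pvFlushB buf parts)
    else if [' ', 'o', 'r', ' '].isPrefixOf (c :: t) then
      pvScanB ((c :: t).drop 4) [] (pvFlushB buf parts)
    else pvScanB t (buf ++ [c]) parts
termination_by l _ _ => l.length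
decreasing_by all_goals (simp; try omega)

def split_compound_non_goal_py_alt (non_goal : String) : List String :=
  pvScanB non_goal.toList [] []

-- ===== PRECONDITION & SPEC =====
def Spec_split_compound_non_goal_py (non_goal : String) (out : List String) : Prop := out = split_compound_non_goal_py_alt non_goal
instance (non_goal : String) (out : List String) : Decidable (Spec_split_compound_non_goal_py non_goal out) := by unfold Spec_split_compound_non_goal_py; infer_instance

-- ===== CLAIM (what is proved, stated in full; the proofs are below) =====
def Claim_equal_split_compound_non_goal_py : Prop := ∀ (non_goal : String), Dom_split_compound_non_goal_py non_goal → Spec_split_compound_non_goal_py non_goal (split_compound_non_goal_py non_goal)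

-- ===== LEMMAS AND PROOFS =====

def pvOR : List Char := [' ', 'o', 'r', ' ']

-- fuel-free models of the two library splits used by port A
def splitC : List Char → List (List Char)
  | [] => [[]]
  | c :: t => if c = ',' then [] :: splitC t else (splitC t).modifyHead (c :: ·)

def splitOR (l : List Char) : List (List Char) :=
  if h : pvOR.isPrefixOf l then [] :: splitOR (l.drop 4)
  else
    match l with
    | [] => [[]]
    | c :: t => (splitOR t).modifyHead (c :: ·)
termination_by l.length
decreasing_by
  · have := (List.isPrefixOf_iff_prefix.mp h).length_le
    simp [pvOR] at this
    simp
    omega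
  · simp

-- fuel-free model of B's scanner token split
def tokSplit : List Char → List (List Char)
  | [] => [[]]
  | c :: t =>
    if c = ',' then [] :: tokSplit t
    else if pvOR.isPrefixOf (c :: t) then [] :: tokSplit ((c :: t).drop 4)
    else (tokSplit t).modifyHead (c :: ·)
termination_by l => l.length
decreasing_by all_goals (simp; try omega)

lemma splitOR_prefix {l : List Char} (h : pvOR.isPrefixOf l) :
    splitOR l = [] :: splitOR (l.drop 4) := by rw [splitOR]; simp [h]

lemma splitOR_nil : splitOR [] = [[]] := by rw [splitOR]; simp [pvOR]

lemma splitOR_cons {c : Char} {t : List Char} (h : ¬ pvOR.isPrefixOf (c :: t)) :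
    splitOR (c :: t) = (splitOR t).modifyHead (c :: ·) := by rw [splitOR]; simp [h]

lemma modifyHead_comp {a : Type} (f g : List a -> List a) (l : List (List a)) :
    (l.modifyHead g).modifyHead f = l.modifyHead (fun x => f (g x)) := by
  cases l <;> simp

lemma modifyHead_append_left {a : Type} (f : List a -> List a) (l : List (List a)) (m : List (List a))
    (h : l ≠ []) : (l ++ m).modifyHead f = l.modifyHead f ++ m := by
  cases l <;> simp_all

lemma modifyHead_id' {a : Type} (l : List (List a)) : l.modifyHead (fun x => x) = l := by
  cases l <;> simp

-- bridges: the library fuel-based scans compute the fuel-free models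
lemma go_comma (fuel : Nat) : ∀ (l cur : List Char) (acc : List (List Char)), l.length ≤ fuel →
    PySem.Chars.splitOn.go [','] fuel l cur acc =
      acc.reverse ++ (splitC l).modifyHead (cur.reverse ++ ·) := by
  induction fuel with
  | zero =>
    intro l cur acc hl
    have hn : l = [] := List.eq_nil_of_length_eq_zero (by omega)
    subst hn
    rw [PySem.Chars.splitOn.go]
    simp [splitC]
  | succ n ih =>
    intro l cur acc hl
    match l with
    | [] =>
      rw [PySem.Chars.splitOn.go]
      all_goals simp [splitC]
    | c :: t =>
      rw [PySem.Chars.splitOn.go]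
      by_cases hc : c = ','
      · subst hc
        have hpre : [','].isPrefixOf (',' :: t) = true := by simp [List.isPrefixOf]
        have hd : List.drop [','].length (',' :: t) = t := rfl
        rw [if_pos hpre, hd, ih t [] (cur.reverse :: acc) (by simpa using hl)]
        cases hsc : splitC t <;> simp [splitC, hsc]
      · have hpre : ¬ ([','].isPrefixOf (c :: t) = true) := by
          simp [List.isPrefixOf, hc]
          intro h; exact absurd h.symm hc
        rw [if_neg hpre, ih t (c :: cur) acc (by simpa using hl)]
        simp [splitC, hc, modifyHead_comp, Function.comp_def]

lemma go_or (fuel : Nat) : ∀ (l cur : List Char) (acc : List (List Char)), l.length ≤ fuel →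
    PySem.Chars.splitOn.go pvOR fuel l cur acc =
      acc.reverse ++ (splitOR l).modifyHead (cur.reverse ++ ·) := by
  induction fuel with
  | zero =>
    intro l cur acc hl
    have hn : l = [] := List.eq_nil_of_length_eq_zero (by omega)
    subst hn
    rw [PySem.Chars.splitOn.go]
    simp [splitOR_nil]
  | succ n ih =>
    intro l cur acc hl
    match l with
    | [] =>
      rw [PySem.Chars.splitOn.go]
      all_goals simp [splitOR_nil]
    | c :: t =>
      rw [PySem.Chars.splitOn.go]
      by_cases hpre : pvOR.isPrefixOf (c :: t)
      · obtain ⟨u, hu⟩ := List.isPrefixOf_iff_prefix.mp hpre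
        rw [if_pos hpre, splitOR_prefix hpre]
        have hdrop : List.drop pvOR.length (c :: t) = (c :: t).drop 4 := by simp [pvOR]
        rw [hdrop, ih ((c :: t).drop 4) [] (cur.reverse :: acc)
          (by simp at hl ⊢; omega)]
        simp
        exact modifyHead_id' _
      · rw [if_neg hpre, splitOR_cons hpre, ih t (c :: cur) acc (by simpa using hl)]
        cases hs : splitOR t <;> simp [hs]

lemma splitOn_comma (l : List Char) : PySem.Chars.splitOn l [','] = splitC l := by
  rw [PySem.Chars.splitOn, go_comma (l.length + 1) l [] [] (by omega)]
  cases h : splitC l <;> simp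

lemma splitOn_or (l : List Char) : PySem.Chars.splitOn l pvOR = splitOR l := by
  rw [PySem.Chars.splitOn, go_or (l.length + 1) l [] [] (by omega)]
  cases h : splitOR l <;> simp

-- structure of the fuel-free splits
lemma splitC_head_prefix (l : List Char) : ∃ h t, splitC l = h :: t ∧ h <+: l := by
  induction l with
  | nil => exact ⟨[], [], rfl, List.nil_prefix⟩
  | cons c t ih =>
    obtain ⟨h, tl, heq, hpre⟩ := ih
    by_cases hc : c = ','
    · exact ⟨[], splitC t, by simp [splitC, hc], List.nil_prefix⟩
    · exact ⟨c :: h, tl, by simp [splitC, hc, heq], List.cons_prefix_cons.mpr ⟨rfl, hpre⟩⟩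

lemma splitOR_ne_nil_aux (n : Nat) : ∀ l : List Char, l.length ≤ n → splitOR l ≠ [] := by
  induction n with
  | zero =>
    intro l hl
    have hn : l = [] := List.eq_nil_of_length_eq_zero (by omega)
    subst hn
    rw [splitOR_nil]; simp
  | succ n ih =>
    intro l hl
    by_cases hpre : pvOR.isPrefixOf l
    · rw [splitOR_prefix hpre]; simp
    · match l with
      | [] => rw [splitOR_nil]; simp
      | c :: t =>
        rw [splitOR_cons hpre]
        cases hs : splitOR t with
        | nil => exact absurd hs (ih t (by simpa using hl))
        | cons a b => simp

lemma splitOR_ne_nil (l : List Char) : splitOR l ≠ [] :=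
  splitOR_ne_nil_aux l.length l le_rfl

lemma splitC_append_or (t : List Char) :
    splitC (pvOR ++ t) = (splitC t).modifyHead (pvOR ++ ·) := by
  cases hs : splitC t <;> simp [pvOR, splitC, hs]

-- tokSplit equations
lemma tokSplit_nil : tokSplit [] = [[]] := by rw [tokSplit]

lemma tokSplit_comma (t : List Char) : tokSplit (',' :: t) = [] :: tokSplit t := by
  rw [tokSplit]; simp

lemma tokSplit_or {c : Char} {t : List Char} (h : pvOR.isPrefixOf (c :: t)) :
    tokSplit (c :: t) = [] :: tokSplit ((c :: t).drop 4) := by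
  have hc : c = ' ' := by
    have := (List.isPrefixOf_iff_prefix.mp h)
    obtain ⟨u, hu⟩ := this
    simp [pvOR] at hu
    exact hu.1.symm
  subst hc
  rw [tokSplit, if_neg (by decide : ¬ (' ' : Char) = ','), if_pos h]

lemma tokSplit_cons {c : Char} {t : List Char} (hc : c ≠ ',')
    (h : ¬ pvOR.isPrefixOf (c :: t)) :
    tokSplit (c :: t) = (tokSplit t).modifyHead (c :: ·) := by
  rw [tokSplit]; simp [hc, h]

-- the key structural fact: the scanner's token split is the flattening of the nested splits
lemma tok_eq_aux (n : Nat) : ∀ l : List Char, l.length ≤ n →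
    tokSplit l = (splitC l).flatMap splitOR := by
  induction n with
  | zero =>
    intro l hl
    have hn : l = [] := List.eq_nil_of_length_eq_zero (by omega)
    subst hn
    simp [tokSplit_nil, splitC, splitOR_nil]
  | succ n ih =>
    intro l hl
    match l with
    | [] => simp [tokSplit_nil, splitC, splitOR_nil]
    | c :: t =>
      by_cases hc : c = ','
      · subst hc
        rw [tokSplit_comma, show splitC (',' :: t) = [] :: splitC t from by simp [splitC],
          ih t (by simpa using hl)]
        simp [splitOR_nil]
      · by_cases hpre : pvOR.isPrefixOf (c :: t)
        · obtain ⟨u, hu⟩ := List.isPrefixOf_iff_prefix.mp hpre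
          rw [tokSplit_or hpre]
          have hdrop : (c :: t).drop 4 = u := by rw [← hu]; simp [pvOR]
          have hlen : u.length ≤ n := by
            have : (c :: t).length = pvOR.length + u.length := by rw [← hu]; simp
            simp [pvOR] at this
            simp at hl
            omega
          rw [hdrop, ih u hlen, ← hu, splitC_append_or u]
          obtain ⟨h, tl, heq, _⟩ := splitC_head_prefix u
          rw [heq]
          have hpre2 : pvOR.isPrefixOf (pvOR ++ h) := List.isPrefixOf_iff_prefix.mpr ⟨h, rfl⟩
          have hdrop2 : (pvOR ++ h).drop 4 = h := by simp [pvOR]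
          simp [splitOR_prefix hpre2, hdrop2]
        · rw [tokSplit_cons hc hpre,
            show splitC (c :: t) = (splitC t).modifyHead (c :: ·) from by simp [splitC, hc],
            ih t (by simpa using hl)]
          obtain ⟨h, tl, heq, hp⟩ := splitC_head_prefix t
          rw [heq]
          have hpre2 : ¬ pvOR.isPrefixOf (c :: h) := by
            intro hcon
            apply hpre
            rw [List.isPrefixOf_iff_prefix] at hcon ⊢
            exact hcon.trans (List.cons_prefix_cons.mpr ⟨rfl, hp⟩)
          simp only [List.flatMap_cons, List.modifyHead_cons]
          rw [splitOR_cons hpre2,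
            modifyHead_append_left _ _ _ (splitOR_ne_nil h)]

lemma tok_eq (l : List Char) : tokSplit l = (splitC l).flatMap splitOR :=
  tok_eq_aux l.length l le_rfl

-- the scanner folds the flush step over its token split
lemma scan_eq_aux (n : Nat) : ∀ (l : List Char), l.length ≤ n → ∀ (buf : List Char) (parts : List String),
    pvScanB l buf parts =
      ((tokSplit l).modifyHead (buf ++ ·)).foldl (fun p tok => pvFlushB tok p) parts := by
  induction n with
  | zero =>
    intro l hl buf parts
    have hn : l = [] := List.eq_nil_of_length_eq_zero (by omega)
    subst hn
    rw [pvScanB]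
    simp [tokSplit_nil]
  | succ n ih =>
    intro l hl buf parts
    match l with
    | [] =>
      rw [pvScanB]
      simp [tokSplit_nil]
    | c :: t =>
      rw [pvScanB]
      by_cases hc : c = ','
      · subst hc
        rw [if_pos rfl, tokSplit_comma, ih t (by simpa using hl)]
        simp [modifyHead_id']
      · by_cases hpre : ([' ', 'o', 'r', ' '] : List Char).isPrefixOf (c :: t)
        · rw [if_neg hc, if_pos hpre, tokSplit_or hpre,
            ih ((c :: t).drop 4) (by simp at hl ⊢; omega)]
          simp [modifyHead_id']
        · rw [if_neg hc, if_neg hpre, tokSplit_cons hc hpre,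
            ih t (by simpa using hl), modifyHead_comp]
          simp

lemma foldl_flatMap' {α β : Type} (f : α → List α) (g : List β → α → List β)
    (l : List α) (init : List β) :
    (l.flatMap f).foldl g init = l.foldl (fun acc x => (f x).foldl g acc) init := by
  induction l generalizing init with
  | nil => simp
  | cons c t ih => simp [List.flatMap_cons, List.foldl_append, ih]

-- ===== VERDICT (by name: the statement is the Claim_ definition above) =====
theorem split_compound_non_goal_py_spec : Claim_equal_split_compound_non_goal_py := by
  intro s _
  unfold Spec_split_compound_non_goal_py split_compound_non_goal_py split_compound_non_goal_py_alt
  rw [scan_eq_aux s.toList.length s.toList le_rfl [] []]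
  simp only [List.nil_append]
  rw [modifyHead_id', tok_eq, foldl_flatMap', splitOn_comma]
  congr 1
  funext parts fragment
  rw [show ([' ', 'o', 'r', ' '] : List Char) = pvOR from rfl, splitOn_or]
  rfl
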